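-- pv_equiv track=rewrite | github.com/AccOlaDe-peng/Code-Knowledge-Graph | code-graph-system/backend/analyzer/dependency_analyzer.py | _go_import_candidates
-- ===== SOURCE A (Python) =====
-- def _go_import_candidates(import_str: str) -> list[str]:
--     # stdlib（无 /）跳过
--     if "/" not in import_str:
--         return []
--     parts = import_str.split("/")
--     cands: list[str] = []
--     # 从最长后缀到最短后缀依次尝试
--     for i in range(len(parts), 0, -1):
--         cands.append("/".join(parts[-i:]))
--     return cands
-- ===== SOURCE B (Python) =====
-- def _go_import_candidates(import_str: str) -> list[str]:
--     # stdlib imports (no slash) are skipped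
--     if "/" not in import_str:
--         return []
--     cands = [import_str]
--     for i, c in enumerate(import_str):
--         if c == "/":
--             cands.append(import_str[i + 1:])
--     return cands
-- ===== Notes on version B (the rewrite author's own statement) =====
-- stated objective: alternative
-- what changed: B replaces splitting on the slash and re-joining list slices for every suffix length by a single left-to-right character scan that emits the tail of the original string after each slash.
import Mathlib
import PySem

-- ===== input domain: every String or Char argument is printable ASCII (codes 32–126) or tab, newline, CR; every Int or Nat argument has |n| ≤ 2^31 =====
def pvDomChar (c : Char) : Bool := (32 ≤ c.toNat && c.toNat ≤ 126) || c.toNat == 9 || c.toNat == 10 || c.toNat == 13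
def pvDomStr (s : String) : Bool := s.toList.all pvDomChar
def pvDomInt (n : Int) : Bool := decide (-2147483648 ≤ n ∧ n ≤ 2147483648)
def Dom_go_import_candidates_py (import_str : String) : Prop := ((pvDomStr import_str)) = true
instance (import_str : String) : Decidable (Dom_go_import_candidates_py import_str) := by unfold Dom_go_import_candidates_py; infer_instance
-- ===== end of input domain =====

-- B replaces splitting on the slash plus re-joining list slices by one character scan
-- emitting the tail of the original string after each slash; same cost, different decomposition.

-- ===== PORT A =====
-- parts = import_str.split("/"); for i in range(len(parts), 0, -1): cands.append("/".join(parts[-i:]))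
def go_import_candidates_py (import_str : String) : List String :=
  if PySem.Str.isIn "/" import_str = false then []
  else
    let parts : List String :=
      (PySem.Chars.splitOn import_str.toList "/".toList).map String.ofList
    (PySem.List.pyRange (parts.length : Int) 0 (-1)).foldl
      (fun cands i =>
        cands ++ [PySem.Str.join "/" (PySem.List.slice parts (some (-i)) none)]) []

-- ===== PORT B =====
-- the loop 'for i, c in enumerate(import_str): if c == "/": cands.append(import_str[i+1:])'
-- as structural recursion on the remaining characters: at position i the remaining list
-- after c is exactly import_str[i+1:] (exact on all inputs).
def pvScanB (cands : List (List Char)) : List Char → List (List Char)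
  | [] => cands
  | c :: rest => pvScanB (if c = '/' then cands ++ [rest] else cands) rest

def go_import_candidates_py_alt (import_str : String) : List String :=
  if PySem.Str.isIn "/" import_str = false then []
  else (pvScanB [import_str.toList] import_str.toList).map String.ofList

-- ===== PRECONDITION & SPEC =====
def Spec_go_import_candidates_py (import_str : String) (out : List String) : Prop := out = go_import_candidates_py_alt import_str
instance (import_str : String) (out : List String) : Decidable (Spec_go_import_candidates_py import_str out) := by unfold Spec_go_import_candidates_py; infer_instance

-- ===== CLAIM (what is proved, stated in full; the proofs are below) =====
def Claim_equal_go_import_candidates_py : Prop := ∀ (import_str : String), Dom_go_import_candidates_py import_str → Spec_go_import_candidates_py import_str (go_import_candidates_py import_str)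

-- ===== LEMMAS AND PROOFS =====

-- proof-side single-character split (what splitOn computes for sep = "/")
def pvSplit : List Char → List (List Char)
  | [] => [[]]
  | c :: rest =>
    if c = '/' then [] :: pvSplit rest
    else
      match pvSplit rest with
      | [] => [[c]]
      | h :: t => (c :: h) :: t

-- proof-side tail collector (pvScanB without the accumulator)
def pvTails : List Char → List (List Char)
  | [] => []
  | c :: rest => if c = '/' then rest :: pvTails rest else pvTails rest

def pvMapHead (f : List Char → List Char) : List (List Char) → List (List Char)
  | [] => []
  | h :: t => f h :: t

theorem pvSplit_ne_nil (l : List Char) : pvSplit l ≠ [] := by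
  cases l with
  | nil => simp [pvSplit]
  | cons c rest =>
    simp only [pvSplit]
    split
    · simp
    · cases h : pvSplit rest <;> simp

theorem pvScanB_eq (acc : List (List Char)) (l : List Char) :
    pvScanB acc l = acc ++ pvTails l := by
  induction l generalizing acc with
  | nil => simp [pvScanB, pvTails]
  | cons c rest ih =>
    simp only [pvScanB, pvTails]
    by_cases h : c = '/' <;> simp [h, ih]

theorem pvSplitOn_go_eq (l : List Char) :
    ∀ (fuel : Nat) (cur : List Char) (acc : List (List Char)), l.length < fuel →
    PySem.Chars.splitOn.go ['/'] fuel l cur acc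
      = acc.reverse ++ pvMapHead (cur.reverse ++ ·) (pvSplit l) := by
  induction l with
  | nil =>
    intro fuel cur acc h
    match fuel with
    | f + 1 => simp [PySem.Chars.splitOn.go, pvSplit, pvMapHead]
  | cons c rest ih =>
    intro fuel cur acc h
    match fuel with
    | f + 1 =>
      by_cases hc : c = '/'
      · have : List.isPrefixOf ['/'] (c :: rest) = true := by simp [hc, List.isPrefixOf]
        simp only [PySem.Chars.splitOn.go, this, if_pos, List.length_cons, List.length_nil,
          List.drop_succ_cons, List.drop_zero]
        rw [ih f [] (cur.reverse :: acc) (by simpa using h)]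
        cases hr : pvSplit rest <;> simp [pvSplit, hc, pvMapHead, hr]
      · have : List.isPrefixOf ['/'] (c :: rest) = false := by
          simp [List.isPrefixOf]; intro hh; exact absurd hh.symm hc
        simp only [PySem.Chars.splitOn.go, this]
        rw [if_neg (by simp), ih f (c :: cur) acc (by simpa using h)]
        simp only [pvSplit, if_neg hc]
        cases hr : pvSplit rest with
        | nil => exact absurd hr (pvSplit_ne_nil rest)
        | cons p ps => simp [pvMapHead]

theorem pvSplitOn_eq (l : List Char) :
    PySem.Chars.splitOn l ['/'] = pvSplit l := by
  have := pvSplitOn_go_eq l (l.length + 1) [] [] (by omega)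
  rw [PySem.Chars.splitOn, this]
  cases h : pvSplit l with
  | nil => exact absurd h (pvSplit_ne_nil l)
  | cons p ps => simp [pvMapHead]

-- the descending-suffix joins of pvSplit l are l followed by the tails after each '/'
theorem pvJoin_drop (l : List Char) :
    (List.range (pvSplit l).length).map
      (fun k => PySem.Chars.join ['/'] ((pvSplit l).drop k))
      = l :: pvTails l := by
  induction l with
  | nil => simp [pvSplit, pvTails, PySem.Chars.join_singleton]
  | cons c rest ih =>
    by_cases hc : c = '/'
    · have hrec : pvSplit (c :: rest) = [] :: pvSplit rest := by simp [pvSplit, hc]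
      rw [hrec]
      simp only [List.length_cons, List.range_succ_eq_map, List.map_cons, List.map_map,
        List.drop_zero]
      have hhead : PySem.Chars.join ['/'] ([] :: pvSplit rest) = c :: rest := by
        cases hr : pvSplit rest with
        | nil => exact absurd hr (pvSplit_ne_nil rest)
        | cons p ps =>
          rw [PySem.Chars.join_cons_cons]
          have : PySem.Chars.join ['/'] (p :: ps) = rest := by
            have := congrArg (fun xs => xs.headD []) ih
            simpa [hr, List.range_succ_eq_map] using this
          rw [this, hc]; simp
      rw [hhead]
      have htail : (List.range (pvSplit rest).length).map
          ((fun k => PySem.Chars.join ['/'] (List.drop k ([] :: pvSplit rest))) ∘ Nat.succ)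
          = rest :: pvTails rest := by
        rw [← ih]; apply List.map_congr_left; intro k _; simp
      rw [htail]
      simp [pvTails, hc]
    · cases hr : pvSplit rest with
      | nil => exact absurd hr (pvSplit_ne_nil rest)
      | cons p ps =>
        have hrec : pvSplit (c :: rest) = (c :: p) :: ps := by simp [pvSplit, hc, hr]
        have ih' := ih
        rw [hr] at ih'
        have hjoin : PySem.Chars.join ['/'] (p :: ps) = rest := by
          have := congrArg (fun xs => xs.headD []) ih'
          simpa [List.range_succ_eq_map] using this
        have hrest : (List.range ps.length).map
            (fun k => PySem.Chars.join ['/'] (ps.drop k)) = pvTails rest := by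
          have := congrArg List.tail ih'
          simp only [List.length_cons, List.range_succ_eq_map, List.map_cons,
            List.map_map, List.tail_cons] at this
          rw [← this]; apply List.map_congr_left; intro k _; simp
        rw [hrec]
        simp only [List.length_cons, List.range_succ_eq_map, List.map_cons, List.map_map,
          List.drop_zero]
        have hhead : PySem.Chars.join ['/'] ((c :: p) :: ps) = c :: rest := by
          cases ps with
          | nil => simp [PySem.Chars.join_singleton, ← hjoin, PySem.Chars.join_singleton]
          | cons q qs =>
            rw [PySem.Chars.join_cons_cons, ← hjoin, PySem.Chars.join_cons_cons]
            simp
        rw [hhead]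
        have : (List.range ps.length).map
            ((fun k => PySem.Chars.join ['/'] (List.drop k ((c :: p) :: ps))) ∘ Nat.succ)
            = pvTails rest := by
          rw [← hrest]; apply List.map_congr_left; intro k _; simp
        rw [this]
        simp [pvTails, hc]

-- ===== VERDICT (by name: the statement is the Claim_ definition above) =====
theorem go_import_candidates_py_spec : Claim_equal_go_import_candidates_py := by
  intro s _
  unfold Spec_go_import_candidates_py go_import_candidates_py go_import_candidates_py_alt
  cases h : PySem.Str.isIn "/" s with
  | false => rw [if_pos rfl, if_pos rfl]
  | true =>
    rw [if_neg (by simp), if_neg (by simp)]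
    rw [pvScanB_eq, List.singleton_append]
    rw [PySem.List.foldl_append_singleton_eq_map, List.nil_append]
    have hone : "/".toList = ['/'] := rfl
    rw [hone, pvSplitOn_eq]
    rw [PySem.List.pyRange_neg_one]
    have hn : ((((pvSplit s.toList).map String.ofList).length : Int) - 0).toNat
        = (pvSplit s.toList).length := by simp
    rw [hn, List.map_map]
    rw [show (s.toList :: pvTails s.toList)
        = (List.range (pvSplit s.toList).length).map
            (fun k => PySem.Chars.join ['/'] ((pvSplit s.toList).drop k))
      from (pvJoin_drop s.toList).symm, List.map_map]
    apply List.map_congr_left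
    intro k hk
    rw [List.mem_range] at hk
    simp only [Function.comp_apply]
    have hlen : ((pvSplit s.toList).map String.ofList).length = (pvSplit s.toList).length :=
      List.length_map ..
    have hcast : -((((pvSplit s.toList).map String.ofList).length : Int) - (k : Int))
        = -(((pvSplit s.toList).length - k : Nat) : Int) := by
      rw [hlen]; push_cast [Nat.cast_sub (le_of_lt hk)]; ring
    rw [hcast, PySem.List.slice_from_neg_natCast _ _ (by omega)]
    rw [hlen]
    have hdrop : (pvSplit s.toList).length - ((pvSplit s.toList).length - k) = k := by omega
    rw [hdrop, ← List.map_drop, PySem.Str.join]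
    congr 1
    rw [List.map_map]
    have : (String.toList ∘ String.ofList) = id := by
      funext xs; simp [String.toList_ofList]
    rw [this, List.map_id]
    rfl
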